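-- pv_equiv track=rewrite | github.com/ipodjke/credit_calculator | main.py | compare_word_with_template
-- ===== SOURCE A (Python) =====
-- def compare_word_with_template(word_for_analyze: str, template: str) -> int:
--     template = list(template)
--     result = 0
--     for char in word_for_analyze:
--         if char in template:
--             result += 1
--             template.remove(char)
--     return result
-- ===== SOURCE B (Python) =====
-- def compare_word_with_template(word_for_analyze: str, template: str) -> int:
--     word_counts = {}
--     for char in word_for_analyze:
--         word_counts[char] = word_counts.get(char, 0) + 1
--     template_counts = {}
--     for char in template:
--         template_counts[char] = template_counts.get(char, 0) + 1
--     return sum(min(n, template_counts.get(char, 0)) for char, n in word_counts.items())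
-- ===== Notes on version B (the rewrite author's own statement) =====
-- stated objective: faster
-- what changed: A scans the word and for each character searches and destructively removes a match from a template list; B builds frequency dictionaries of both strings once and returns the sum of min(word_count, template_count) over the word's distinct characters.
import Mathlib
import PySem

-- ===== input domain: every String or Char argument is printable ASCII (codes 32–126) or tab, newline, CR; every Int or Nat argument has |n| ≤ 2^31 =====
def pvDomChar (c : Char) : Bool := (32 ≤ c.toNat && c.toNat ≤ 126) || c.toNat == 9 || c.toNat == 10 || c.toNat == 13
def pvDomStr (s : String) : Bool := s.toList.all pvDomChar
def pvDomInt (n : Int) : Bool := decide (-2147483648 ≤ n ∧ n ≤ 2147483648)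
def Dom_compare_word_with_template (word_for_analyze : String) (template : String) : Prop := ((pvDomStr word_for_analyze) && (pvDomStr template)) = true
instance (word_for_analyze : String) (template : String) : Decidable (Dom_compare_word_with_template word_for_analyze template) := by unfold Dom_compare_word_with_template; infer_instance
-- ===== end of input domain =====

-- B replaces A's per-character scan-and-remove over a mutable template list by building two
-- character-frequency tables and summing min(word count, template count) over distinct characters (simpler, one pass per string).


-- ===== PORT A =====
def compare_word_with_template (word_for_analyze : String) (template : String) : Int :=
  (word_for_analyze.toList.foldl
    (fun (s : List Char × Int) char =>
      if char ∈ s.1 then (s.1.erase char, s.2 + 1) else s)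
    (template.toList, 0)).2

-- ===== PORT B =====
def compare_word_with_template_alt (word_for_analyze : String) (template : String) : Int :=
  let wc := word_for_analyze.toList.foldl
    (fun (d : PySem.Dict Char Int) c => d.insert c (d.getD c 0 + 1)) PySem.Dict.empty
  let tc := template.toList.foldl
    (fun (d : PySem.Dict Char Int) c => d.insert c (d.getD c 0 + 1)) PySem.Dict.empty
  (wc.items.map (fun p => min p.2 (tc.getD p.1 0))).sum

-- ===== PRECONDITION & SPEC =====
def Spec_compare_word_with_template (word_for_analyze : String) (template : String) (out : Int) : Prop := out = compare_word_with_template_alt word_for_analyze template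
instance (word_for_analyze : String) (template : String) (out : Int) : Decidable (Spec_compare_word_with_template word_for_analyze template out) := by unfold Spec_compare_word_with_template; infer_instance

-- ===== CLAIM (what is proved, stated in full; the proofs are below) =====
def Claim_equal_compare_word_with_template : Prop := ∀ (word_for_analyze : String) (template : String), Dom_compare_word_with_template word_for_analyze template → Spec_compare_word_with_template word_for_analyze template (compare_word_with_template word_for_analyze template)

-- ===== LEMMAS AND PROOFS =====

-- ===== VERDICT (by name: the statement is the Claim_ definition above) =====

-- matched count mirroring A's scan-and-remove recursion
def pvMatch : List Char → List Char → Int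
  | [], _ => 0
  | c :: w, t => if c ∈ t then 1 + pvMatch w (t.erase c) else pvMatch w t

theorem pvFoldA (w t : List Char) (r : Int) :
    (w.foldl (fun (s : List Char × Int) char =>
        if char ∈ s.1 then (s.1.erase char, s.2 + 1) else s) (t, r)).2
      = r + pvMatch w t := by
  induction w generalizing t r with
  | nil => simp [pvMatch]
  | cons c w ih =>
    by_cases h : c ∈ t
    · simp [pvMatch, h, ih]; ring
    · simp [pvMatch, h, ih]

theorem pvSumUpdate (L : List Char) (f g : Char → Int) (c : Char)
    (hnd : L.Nodup) (hc : c ∈ L)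
    (hfg : ∀ k ∈ L, k ≠ c → f k = g k) (hcv : f c = g c + 1) :
    (L.map f).sum = (L.map g).sum + 1 := by
  induction L with
  | nil => cases hc
  | cons a L ih =>
    rcases List.mem_cons.mp hc with rfl | ha
    · have : L.map f = L.map g := by
        apply List.map_congr_left
        intro k hk
        exact hfg k (List.mem_cons_of_mem _ hk)
          (fun he => (List.nodup_cons.mp hnd).1 (he ▸ hk))
      simp [this, hcv]; ring
    · have hne : a ≠ c := fun he => (List.nodup_cons.mp hnd).1 (he ▸ ha)
      have := ih (List.nodup_cons.mp hnd).2 ha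
        (fun k hk => hfg k (List.mem_cons_of_mem _ hk))
      simp [hfg a (List.mem_cons_self) hne, this]; ring

theorem pvMatch_eq_sum (w t L : List Char)
    (hsup : ∀ c ∈ w, c ∈ L) (hnd : L.Nodup) :
    pvMatch w t
      = (L.map (fun k => min ((w.count k : Int)) ((t.count k : Int)))).sum := by
  induction w generalizing t with
  | nil =>
    simp only [pvMatch]
    symm
    apply List.sum_eq_zero
    intro x hx
    rcases List.mem_map.mp hx with ⟨k, _, rfl⟩
    simp
  | cons c w ih =>
    have hsup' : ∀ x ∈ w, x ∈ L := fun x hx => hsup x (List.mem_cons_of_mem _ hx)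
    by_cases h : c ∈ t
    · have hct : 1 ≤ t.count c := List.one_le_count_iff.mpr h
      rw [pvMatch, if_pos h, ih (t.erase c) hsup']
      have hu := pvSumUpdate L
        (fun k => min (((c :: w).count k : Int)) ((t.count k : Int)))
        (fun k => min ((w.count k : Int)) (((t.erase c).count k : Int)))
        c hnd (hsup c List.mem_cons_self) ?_ ?_
      · omega
      · intro k _ hk
        simp [Ne.symm hk, List.count_erase_of_ne hk]
      · simp only [List.count_cons_self, List.count_erase_self]
        push_cast [hct]
        omega
    · have hct : t.count c = 0 := List.count_eq_zero.mpr h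
      rw [pvMatch, if_neg h, ih t hsup']
      apply congrArg List.sum
      apply List.map_congr_left
      intro k _
      by_cases hk : k = c
      · subst hk; simp [hct]; positivity
      · simp [Ne.symm hk]

theorem compare_word_with_template_spec : Claim_equal_compare_word_with_template := by
  intro w t _
  unfold Spec_compare_word_with_template compare_word_with_template compare_word_with_template_alt
  rw [pvFoldA]
  simp only [PySem.Dict.foldl_insert_getD_add_one_eq_counter, PySem.Dict.items_counter,
      List.map_map]
  rw [zero_add, pvMatch_eq_sum w.toList t.toList (PySem.Set.ofList w.toList)
      (fun c hc => (PySem.Set.mem_ofList w.toList c).mpr hc) (PySem.Set.nodup_ofList _)]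
  simp only [Function.comp_def]
  apply congrArg List.sum
  apply List.map_congr_left
  intro k _
  simp [PySem.Dict.getD_counter]
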